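-- pv_equiv track=rewrite | github.com/i4Trust/activation-service | tests/pytest/util/token_handler.py | get_x5c_chain
-- ===== SOURCE A (Python) =====
-- def get_x5c_chain(cert):
--     sp = cert.split('-----BEGIN CERTIFICATE-----\n')
--     sp = sp[1:]
--
--     ca_chain = []
--     for ca in sp:
--         ca_sp = ca.split('\n-----END CERTIFICATE-----')
--         ca_chain.append(ca_sp[0].replace('\n',''))
--
--     return ca_chain
-- ===== SOURCE B (Python) =====
-- BEGIN = '-----BEGIN CERTIFICATE-----\n'
-- END = '\n-----END CERTIFICATE-----'
--
--
-- def _chain(rest):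
--     body, sep, rest2 = rest.partition(BEGIN)
--     cleaned = body.partition(END)[0].replace('\n', '')
--     return [cleaned] + (_chain(rest2) if sep else [])
--
--
-- def get_x5c_chain(cert):
--     head, sep, rest = cert.partition(BEGIN)
--     return _chain(rest) if sep else []
-- ===== Notes on version B (the rewrite author's own statement) =====
-- stated objective: alternative
-- what changed: A splits the whole string on the BEGIN marker and then runs a second split inside a loop over all pieces; B is a recursive single-certificate scanner built on str.partition that extracts one body per step and recurses on the text after the next BEGIN marker.
import Mathlib
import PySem

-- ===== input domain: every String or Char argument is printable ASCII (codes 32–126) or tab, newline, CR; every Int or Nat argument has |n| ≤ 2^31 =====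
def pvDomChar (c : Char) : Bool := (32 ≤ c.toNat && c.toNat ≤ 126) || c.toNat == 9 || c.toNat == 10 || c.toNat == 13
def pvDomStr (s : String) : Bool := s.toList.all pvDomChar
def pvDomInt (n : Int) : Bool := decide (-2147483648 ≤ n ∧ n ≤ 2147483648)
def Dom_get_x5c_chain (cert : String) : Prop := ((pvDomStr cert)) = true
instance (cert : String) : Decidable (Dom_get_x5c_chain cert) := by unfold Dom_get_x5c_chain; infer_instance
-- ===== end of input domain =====

-- B replaces A's split-everything-then-loop with a recursive str.partition scan that
-- extracts one certificate body per step (objective: alternative decomposition, same cost).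

-- ===== PORT A =====
-- cert.split('-----BEGIN CERTIFICATE-----\n'), [1:], then per piece split on the END
-- marker, take piece [0] (split with nonempty sep is never empty, so index 0 is safe:
-- pyGetD's default is never used) and strip '\n'.
def get_x5c_chain (cert : String) : List String :=
  let sp := PySem.Chars.splitOn cert.toList "-----BEGIN CERTIFICATE-----\n".toList
  let sp1 := PySem.List.slice sp (some 1) none
  (sp1.foldl (fun ca_chain ca =>
      let ca_sp := PySem.Chars.splitOn ca "\n-----END CERTIFICATE-----".toList
      ca_chain ++ [PySem.Chars.replace (PySem.List.pyGetD ca_sp 0 []) ['\n'] []]) []).map String.ofList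

-- ===== PORT B =====
def pvBegin : List Char := "-----BEGIN CERTIFICATE-----\n".toList
def pvEnd : List Char := "\n-----END CERTIFICATE-----".toList

-- hand port of Python's s.partition(sep) for nonempty sep (exact there): first occurrence
-- via find, then the three parts as slices
def pvPartition (s sep : List Char) : List Char × List Char × List Char :=
  let i := PySem.Chars.find s sep
  if i = -1 then (s, [], [])
  else (s.take i.toNat, sep, s.drop (i.toNat + sep.length))

-- _chain(rest): one certificate body per step, recurse on the text after the next BEGIN
def pvChainAux (rest : List Char) : List String :=
  let p := pvPartition rest pvBegin
  let cleaned := String.ofList (PySem.Chars.replace (pvPartition p.1 pvEnd).1 ['\n'] [])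
  if p.2.1 = [] then [cleaned] else cleaned :: pvChainAux p.2.2
termination_by rest.length
decreasing_by
  rename_i hne
  have hfind : PySem.Chars.find rest pvBegin ≠ -1 := by
    intro hc
    apply hne
    simp only [p, pvPartition, hc, if_pos]
  have hinf : pvBegin <:+: rest := (PySem.Chars.find_ne_neg_one_iff rest pvBegin).mp hfind
  have h28 : (28 : Nat) ≤ rest.length := by
    have h := hinf.length_le
    have : pvBegin.length = 28 := by decide
    omega
  have hb : pvBegin.length = 28 := by decide
  simp only [pvPartition, if_neg hfind, List.length_drop, hb]
  omega

def get_x5c_chain_alt (cert : String) : List String :=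
  let p := pvPartition cert.toList pvBegin
  if p.2.1 = [] then [] else pvChainAux p.2.2

-- ===== PRECONDITION & SPEC =====
def Spec_get_x5c_chain (cert : String) (out : List String) : Prop := out = get_x5c_chain_alt cert
instance (cert : String) (out : List String) : Decidable (Spec_get_x5c_chain cert out) := by unfold Spec_get_x5c_chain; infer_instance

-- ===== CLAIM (what is proved, stated in full; the proofs are below) =====
def Claim_equal_get_x5c_chain : Prop := ∀ (cert : String), Dom_get_x5c_chain cert → Spec_get_x5c_chain cert (get_x5c_chain cert)

-- ===== LEMMAS AND PROOFS =====

-- step equations of PySem.Chars.splitOn.go (its match on fuel/input, as rfl)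
theorem pvGo_nil (sep : List Char) (n : Nat) (cur : List Char) (acc : List (List Char)) :
    PySem.Chars.splitOn.go sep (n+1) [] cur acc = (cur.reverse :: acc).reverse := rfl

theorem pvGo_cons (sep : List Char) (n : Nat) (c : Char) (rest cur : List Char) (acc : List (List Char)) :
    PySem.Chars.splitOn.go sep (n+1) (c :: rest) cur acc =
      if sep.isPrefixOf (c :: rest) then
        PySem.Chars.splitOn.go sep n ((c :: rest).drop sep.length) [] (cur.reverse :: acc)
      else PySem.Chars.splitOn.go sep n rest (c :: cur) acc := rfl

-- go with enough fuel, pending piece cur and accumulator acc, in terms of splitOn itself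
theorem pvGo_accum (sep : List Char) (hsep : sep ≠ []) :
    ∀ (n : Nat) (l cur : List Char) (acc : List (List Char)) (fuel : Nat),
      l.length ≤ n → l.length < fuel →
      PySem.Chars.splitOn.go sep fuel l cur acc =
        acc.reverse ++ (PySem.Chars.splitOn l sep).modifyHead (cur.reverse ++ ·) := by
  have hsl : 1 ≤ sep.length := by
    cases sep with
    | nil => exact absurd rfl hsep
    | cons a t => simp
  intro n
  induction n with
  | zero =>
    intro l cur acc fuel h1 h2
    have hl : l = [] := List.eq_nil_of_length_eq_zero (Nat.le_zero.mp h1)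
    subst hl
    cases fuel with
    | zero => omega
    | succ m => rw [pvGo_nil]; simp [PySem.Chars.splitOn, pvGo_nil]
  | succ n ih =>
    intro l cur acc fuel h1 h2
    cases l with
    | nil =>
      cases fuel with
      | zero => omega
      | succ m => rw [pvGo_nil]; simp [PySem.Chars.splitOn, pvGo_nil]
    | cons c rest =>
      cases fuel with
      | zero => omega
      | succ m =>
        have hsplit_unfold : PySem.Chars.splitOn (c :: rest) sep =
            PySem.Chars.splitOn.go sep (rest.length + 1 + 1) (c :: rest) [] [] := by
          simp [PySem.Chars.splitOn]
        rw [pvGo_cons]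
        by_cases hp : sep.isPrefixOf (c :: rest)
        · rw [if_pos hp]
          have hdl : ((c :: rest).drop sep.length).length ≤ n := by
            simp only [List.length_drop, List.length_cons]
            simp only [List.length_cons] at h1
            omega
          rw [ih _ [] (cur.reverse :: acc) m hdl
            (by simp only [List.length_drop, List.length_cons] at *; omega)]
          rw [hsplit_unfold, pvGo_cons, if_pos hp,
              ih _ [] [List.reverse []] (rest.length + 1) hdl
                (by simp only [List.length_drop, List.length_cons]; omega)]
          simp
        · rw [if_neg hp]
          have hrl : rest.length ≤ n := by simp only [List.length_cons] at h1; omega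
          rw [ih rest (c :: cur) acc m hrl (by simp only [List.length_cons] at h2; omega)]
          rw [hsplit_unfold, pvGo_cons, if_neg hp, ih rest [c] [] (rest.length + 1) hrl (by omega)]
          cases hsp : PySem.Chars.splitOn rest sep with
          | nil => simp
          | cons h t => simp

-- structural recursion for splitOn (nonempty sep)
theorem pvSplitOn_prefix (sep l : List Char) (hsep : sep ≠ []) (h : sep <+: l) :
    PySem.Chars.splitOn l sep = [] :: PySem.Chars.splitOn (l.drop sep.length) sep := by
  have hsl : 1 ≤ sep.length := by
    cases sep with
    | nil => exact absurd rfl hsep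
    | cons a t => simp
  cases l with
  | nil => exact absurd (List.prefix_nil.mp h) hsep
  | cons c rest =>
    have hp : sep.isPrefixOf (c :: rest) := List.isPrefixOf_iff_prefix.mpr h
    have h0 : PySem.Chars.splitOn (c :: rest) sep =
        PySem.Chars.splitOn.go sep (rest.length + 1 + 1) (c :: rest) [] [] := by
      simp [PySem.Chars.splitOn]
    rw [h0, pvGo_cons, if_pos hp,
        pvGo_accum sep hsep ((c :: rest).drop sep.length).length _ [] [List.reverse []]
          (rest.length + 1) le_rfl (by simp only [List.length_drop, List.length_cons]; omega)]
    cases hsp : PySem.Chars.splitOn ((c :: rest).drop sep.length) sep with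
    | nil => simp
    | cons h t => simp

theorem pvSplitOn_not_prefix (sep : List Char) (c : Char) (rest : List Char) (hsep : sep ≠ [])
    (h : ¬ sep <+: (c :: rest)) :
    PySem.Chars.splitOn (c :: rest) sep = (PySem.Chars.splitOn rest sep).modifyHead (c :: ·) := by
  have hp : ¬ sep.isPrefixOf (c :: rest) := fun hc => h (List.isPrefixOf_iff_prefix.mp hc)
  have h0 : PySem.Chars.splitOn (c :: rest) sep =
      PySem.Chars.splitOn.go sep (rest.length + 1 + 1) (c :: rest) [] [] := by
    simp [PySem.Chars.splitOn]
  rw [h0, pvGo_cons, if_neg hp,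
      pvGo_accum sep hsep rest.length rest [c] [] (rest.length + 1) le_rfl (by omega)]
  cases hsp : PySem.Chars.splitOn rest sep with
  | nil => simp
  | cons h t => simp

-- find is characterised by its spec
theorem pvFind_eq (s sep : List Char) (k : Nat) (h1 : sep <+: s.drop k)
    (h2 : ∀ j < k, ¬ sep <+: s.drop j) : PySem.Chars.find s sep = k := by
  have hin : PySem.Chars.isIn sep s = true :=
    (PySem.Chars.exists_prefix_drop_iff_isIn sep s).mp ⟨k, h1⟩
  have hnn : 0 ≤ PySem.Chars.find s sep :=
    (PySem.Chars.find_nonneg_iff s sep).mpr ((PySem.Chars.isIn_iff_infix sep s).mp hin)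
  obtain ⟨hpre, hmin⟩ := PySem.Chars.find_spec hnn
  have h3 : ¬ ((PySem.Chars.find s sep).toNat < k) := fun hlt => h2 _ hlt hpre
  have h4 : ¬ (k < (PySem.Chars.find s sep).toNat) := fun hlt => hmin _ hlt h1
  omega

-- splitOn in terms of the first occurrence
theorem pvSplitOn_of_find_neg (s sep : List Char) (hsep : sep ≠ [])
    (h : PySem.Chars.find s sep = -1) : PySem.Chars.splitOn s sep = [s] := by
  induction s with
  | nil => rfl
  | cons c rest ih =>
    have hni : ¬ sep <:+: (c :: rest) := (PySem.Chars.find_eq_neg_one_iff _ sep).mp h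
    have hnp : ¬ sep <+: (c :: rest) := fun hc => hni hc.isInfix
    have hnr : ¬ sep <:+: rest := fun hc => hni (hc.trans (List.suffix_cons c rest).isInfix)
    rw [pvSplitOn_not_prefix sep c rest hsep hnp,
        ih ((PySem.Chars.find_eq_neg_one_iff rest sep).mpr hnr)]
    rfl

theorem pvSplitOn_of_find_nonneg (s sep : List Char) (hsep : sep ≠ [])
    (h : 0 ≤ PySem.Chars.find s sep) :
    PySem.Chars.splitOn s sep =
      s.take (PySem.Chars.find s sep).toNat ::
        PySem.Chars.splitOn (s.drop ((PySem.Chars.find s sep).toNat + sep.length)) sep := by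
  induction s with
  | nil =>
    exfalso
    have : ¬ sep <:+: ([] : List Char) := by
      intro hc
      exact hsep (List.eq_nil_of_infix_nil hc)
    have := (PySem.Chars.find_eq_neg_one_iff [] sep).mpr this
    omega
  | cons c rest ih =>
    by_cases hp : sep <+: (c :: rest)
    · have hf0 : PySem.Chars.find (c :: rest) sep = 0 :=
        pvFind_eq (c :: rest) sep 0 (by simpa using hp) (by omega)
      rw [pvSplitOn_prefix sep (c :: rest) hsep hp]
      simp [hf0]
    · obtain ⟨hpre, hmin⟩ := PySem.Chars.find_spec h
      have htn : (PySem.Chars.find (c :: rest) sep).toNat ≠ 0 := by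
        intro hc
        rw [hc] at hpre
        exact hp (by simpa using hpre)
      have hpre' : sep <+: rest.drop ((PySem.Chars.find (c :: rest) sep).toNat - 1) := by
        have : rest.drop ((PySem.Chars.find (c :: rest) sep).toNat - 1) =
            (c :: rest).drop (PySem.Chars.find (c :: rest) sep).toNat := by
          conv_rhs => rw [show (PySem.Chars.find (c :: rest) sep).toNat =
            ((PySem.Chars.find (c :: rest) sep).toNat - 1) + 1 by omega]
          rfl
        rw [this]
        exact hpre
      have hmin' : ∀ j < (PySem.Chars.find (c :: rest) sep).toNat - 1, ¬ sep <+: rest.drop j := by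
        intro j hj hc
        exact hmin (j + 1) (by omega) (by simpa using hc)
      have hfr : PySem.Chars.find rest sep =
          ((PySem.Chars.find (c :: rest) sep).toNat - 1 : Nat) := pvFind_eq rest sep _ hpre' hmin'
      have hfrn : 0 ≤ PySem.Chars.find rest sep := by rw [hfr]; positivity
      have hnp : ¬ sep <+: (c :: rest) := hp
      rw [pvSplitOn_not_prefix sep c rest hsep hnp, ih hfrn]
      have e1 : (PySem.Chars.find rest sep).toNat =
          (PySem.Chars.find (c :: rest) sep).toNat - 1 := by rw [hfr]; simp
      rw [e1]
      have e2 : (c :: rest).take (PySem.Chars.find (c :: rest) sep).toNat =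
          c :: rest.take ((PySem.Chars.find (c :: rest) sep).toNat - 1) := by
        conv_lhs => rw [show (PySem.Chars.find (c :: rest) sep).toNat =
          ((PySem.Chars.find (c :: rest) sep).toNat - 1) + 1 by omega]
        rfl
      have e3 : (c :: rest).drop ((PySem.Chars.find (c :: rest) sep).toNat + sep.length) =
          rest.drop ((PySem.Chars.find (c :: rest) sep).toNat - 1 + sep.length) := by
        conv_lhs => rw [show (PySem.Chars.find (c :: rest) sep).toNat + sep.length =
          ((PySem.Chars.find (c :: rest) sep).toNat - 1 + sep.length) + 1 by omega]
        rfl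
      rw [e2, e3]
      rfl

-- partition's first component is split's first piece
theorem pvPartition_fst (s sep : List Char) (hsep : sep ≠ []) :
    (pvPartition s sep).1 = PySem.List.pyGetD (PySem.Chars.splitOn s sep) 0 [] := by
  by_cases hf : PySem.Chars.find s sep = -1
  · rw [pvSplitOn_of_find_neg s sep hsep hf]
    simp [pvPartition, hf, PySem.List.pyGetD, PySem.List.pyGet?, PySem.List.pyIdx?]
  · have hnn : 0 ≤ PySem.Chars.find s sep := by
      have := PySem.Chars.neg_one_le_find s sep
      omega
    rw [pvSplitOn_of_find_nonneg s sep hsep hnn]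
    simp [pvPartition, hf, PySem.List.pyGetD, PySem.List.pyGet?, PySem.List.pyIdx?]

-- the per-piece cleanup both sides perform
def pvClean (ca : List Char) : String :=
  String.ofList (PySem.Chars.replace (PySem.List.pyGetD (PySem.Chars.splitOn ca pvEnd) 0 []) ['\n'] [])

theorem pvChainAux_eq (rest : List Char) :
    pvChainAux rest = (PySem.Chars.splitOn rest pvBegin).map pvClean := by
  have hB : pvBegin ≠ [] := by decide
  have hE : pvEnd ≠ [] := by decide
  induction hn : rest.length using Nat.strong_induction_on generalizing rest with
  | _ n ih =>
  subst hn
  rw [pvChainAux]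
  by_cases hf : PySem.Chars.find rest pvBegin = -1
  · rw [pvSplitOn_of_find_neg rest pvBegin hB hf]
    have hpp : pvPartition rest pvBegin = (rest, [], []) := by simp [pvPartition, hf]
    rw [hpp, if_pos rfl]
    simp only [List.map_cons, List.map_nil]
    congr 1
    simp only [pvClean, pvPartition_fst _ pvEnd hE]
  · have hnn : 0 ≤ PySem.Chars.find rest pvBegin := by
      have := PySem.Chars.neg_one_le_find rest pvBegin
      omega
    have h28 : (28 : Nat) ≤ rest.length := by
      have hinf : pvBegin <:+: rest := (PySem.Chars.find_nonneg_iff rest pvBegin).mp hnn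
      have h := hinf.length_le
      have : pvBegin.length = 28 := by decide
      omega
    have hlt : (rest.drop ((PySem.Chars.find rest pvBegin).toNat + pvBegin.length)).length
        < rest.length := by
      have : pvBegin.length = 28 := by decide
      simp only [List.length_drop, this]
      omega
    have hpp : pvPartition rest pvBegin =
        (rest.take (PySem.Chars.find rest pvBegin).toNat, pvBegin,
          rest.drop ((PySem.Chars.find rest pvBegin).toNat + pvBegin.length)) := by
      simp [pvPartition, hf]
    rw [pvSplitOn_of_find_nonneg rest pvBegin hB hnn, hpp]
    rw [if_neg (show ¬ ((rest.take (PySem.Chars.find rest pvBegin).toNat, pvBegin,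
          rest.drop ((PySem.Chars.find rest pvBegin).toNat + pvBegin.length)).2.1 = ([] : List Char))
        by simpa using hB)]
    rw [List.map_cons, ih _ hlt _ rfl]
    congr 1
    simp only [pvClean, pvPartition_fst _ pvEnd hE]

-- ===== VERDICT (by name: the statement is the Claim_ definition above) =====
theorem get_x5c_chain_spec : Claim_equal_get_x5c_chain := by
  intro cert _
  unfold Spec_get_x5c_chain
  have hB : pvBegin ≠ [] := by decide
  show get_x5c_chain cert = get_x5c_chain_alt cert
  rw [get_x5c_chain, get_x5c_chain_alt]
  simp only [PySem.List.foldl_append_singleton_eq_map, List.nil_append, List.map_map,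
    PySem.List.slice_from _ (by omega : (0:Int) ≤ 1)]
  by_cases hf : PySem.Chars.find cert.toList pvBegin = -1
  · rw [show "-----BEGIN CERTIFICATE-----\n".toList = pvBegin from rfl,
        pvSplitOn_of_find_neg cert.toList pvBegin hB hf]
    simp [pvPartition, hf]
  · have hnn : 0 ≤ PySem.Chars.find cert.toList pvBegin := by
      have := PySem.Chars.neg_one_le_find cert.toList pvBegin
      omega
    rw [show "-----BEGIN CERTIFICATE-----\n".toList = pvBegin from rfl,
        pvSplitOn_of_find_nonneg cert.toList pvBegin hB hnn]
    rw [if_neg (show ¬ ((pvPartition cert.toList pvBegin).2.1 = []) by simpa [pvPartition, hf] using hB)]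
    rw [pvChainAux_eq]
    simp only [pvPartition, hf]
    rfl
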